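-- pv_equiv track=rewrite | github.com/mawi13/coda-automation | scripts/leaderboard-upload/challenges.py | winners
-- ===== SOURCE A (Python) =====
-- def winners(metrics, metric_name, point_values):
--     """Awards points to the top scoring users in a particular metric
--
--     point_values should be a list of point values like [1000, 500, 200].
--     In this example, 1000 points are awarded to the top scoring member,
--     500 to the second place, and 200 to the third. Any number of point
--     values can be specified, and points are awarded to all applicable users
--     in the case of a tie.
--
--     Users need to have a non-zero metric value to qualify.
--
--     arguments:
--     metrics -- metrics object
--     metric_name -- the name of the metric for which points are being awarded
--     point_values -- List of point values for the top scorers in order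
--     """
--     metrics_values = set()
--     metric_to_user = {}
--     points = {}
--     for user, user_metric in metrics.items():
--         # initialize all users to 0
--         points[user] = 0
--
--         metric = int(user_metric.get(metric_name, 0))
--         if (metric > 0):
--             # Add to the set of metrics values
--             metrics_values.add(metric)
--
--             # add user to the list of people with this metric value
--             users = metric_to_user.get(metric, [])
--             users.append(user)
--             metric_to_user[metric] = users
--
--     sorted_metrics = sorted(list(metrics_values), reverse=True)
--
--     for metric, point_value in zip(sorted_metrics, point_values):
--         for user in metric_to_user[metric]:
--             points[user] = point_value
--
--     return points
-- ===== SOURCE B (Python) =====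
-- def winners(metrics, metric_name, point_values):
--     """Award point_values to top distinct scorers of metric_name (ties share
--     a rank); each user's rank is computed directly by counting the distinct
--     qualifying values above his own, with no sorting or grouping."""
--     vals = {user: int(um.get(metric_name, 0)) for user, um in metrics.items()}
--     qualifying = {v for v in vals.values() if v > 0}
--     n = len(point_values)
--
--     def award(m):
--         if m <= 0:
--             return 0
--         rank = sum(1 for v in qualifying if v > m)
--         return point_values[rank] if rank < n else 0
--
--     return {user: award(m) for user, m in vals.items()}
-- ===== Notes on version B (the rewrite author's own statement) =====
-- stated objective: alternative
-- what changed: B replaces A's sort-the-distinct-values / group-users-by-value / second assignment loop by a direct per-user computation: each user's rank is the count of distinct qualifying values strictly above his own, looked up in point_values, with no sorting and no grouping dict.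
import Mathlib
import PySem

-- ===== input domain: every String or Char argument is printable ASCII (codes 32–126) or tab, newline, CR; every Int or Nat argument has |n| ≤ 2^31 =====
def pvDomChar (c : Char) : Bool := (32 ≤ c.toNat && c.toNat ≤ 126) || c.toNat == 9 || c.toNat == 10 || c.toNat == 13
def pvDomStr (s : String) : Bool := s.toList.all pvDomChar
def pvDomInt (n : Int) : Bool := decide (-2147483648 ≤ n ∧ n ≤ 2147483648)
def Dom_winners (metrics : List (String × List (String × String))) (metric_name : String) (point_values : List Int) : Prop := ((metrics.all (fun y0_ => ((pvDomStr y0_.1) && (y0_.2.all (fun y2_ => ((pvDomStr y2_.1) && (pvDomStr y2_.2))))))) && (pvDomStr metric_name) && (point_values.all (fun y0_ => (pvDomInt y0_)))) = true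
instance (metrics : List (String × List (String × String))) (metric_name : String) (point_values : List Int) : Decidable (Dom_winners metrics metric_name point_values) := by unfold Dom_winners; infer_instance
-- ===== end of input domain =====

-- B replaces A's sort/group/assign passes by a direct per-user rank count (count of distinct
-- qualifying values above the user's own); an alternative decomposition of the same function.


-- ===== PORT A =====
-- shared helper: int(user_metric.get(metric_name, 0)); total via getD 0 — Pre_ excludes the
-- inputs on which Python's int(...) raises ValueError
def pvMetric (um : List (String × String)) (name : String) : Int :=
  match (PySem.Dict.ofList um).get? name with
  | some s => (PySem.Int.ofStr? s).getD 0
  | none => 0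

def winners (metrics : List (String × List (String × String))) (metric_name : String) (point_values : List Int) : List (String × Int) :=
  let md := PySem.Dict.ofList metrics
  let st := md.items.foldl
    (fun (st : PySem.Set Int × PySem.Dict Int (List String) × PySem.Dict String Int) p =>
      if 0 < pvMetric p.2 metric_name then
        (PySem.Set.add st.1 (pvMetric p.2 metric_name),
         st.2.1.modify (pvMetric p.2 metric_name) [] (fun us => us ++ [p.1]),
         st.2.2.insert p.1 0)
      else (st.1, st.2.1, st.2.2.insert p.1 0))
    (PySem.Set.empty, PySem.Dict.empty, PySem.Dict.empty)
  let sortedMetrics := PySem.List.sorted (st.1 : List Int) (fun v => v) true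
  let pts := (sortedMetrics.zip point_values).foldl
    (fun pts mp => (st.2.1.getD mp.1 []).foldl (fun pts u => pts.insert u mp.2) pts) st.2.2
  pts.items

-- ===== PORT B =====
def pvAward (qualifying : PySem.Set Int) (point_values : List Int) (m : Int) : Int :=
  if m ≤ 0 then 0
  else
    let rank := qualifying.countP (fun v => decide (m < v))
    if rank < point_values.length then point_values.getD rank 0 else 0

def winners_alt (metrics : List (String × List (String × String))) (metric_name : String) (point_values : List Int) : List (String × Int) :=
  let vals := (PySem.Dict.ofList metrics).items.foldl
    (fun (d : PySem.Dict String Int) p => d.insert p.1 (pvMetric p.2 metric_name)) PySem.Dict.empty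
  let qualifying := PySem.Set.ofList (vals.values.filter (fun v => 0 < v))
  vals.items.map (fun p => (p.1, pvAward qualifying point_values p.2))

-- ===== PRECONDITION & SPEC =====
-- Pre_ excludes exactly the inputs on which Python's int(...) raises ValueError (a metric
-- string for metric_name that does not parse as an int); both A and B raise there.
def Pre_winners (metrics : List (String × List (String × String))) (metric_name : String) (point_values : List Int) : Prop :=
  ∀ p ∈ metrics, (((PySem.Dict.ofList p.2).get? metric_name).all (fun s => (PySem.Int.ofStr? s).isSome)) = true
instance (metrics : List (String × List (String × String))) (metric_name : String) (point_values : List Int) : Decidable (Pre_winners metrics metric_name point_values) := by unfold Pre_winners; infer_instance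

def pvWitness_winners : (List (String × List (String × String))) × String × List Int :=
  ([("alice", [("score", "3")]), ("bob", [("score", "3")]), ("carol", [("score", "1")]), ("dan", [])], "score", [10, 5])

def Spec_winners (metrics : List (String × List (String × String))) (metric_name : String) (point_values : List Int) (out : List (String × Int)) : Prop := out = winners_alt metrics metric_name point_values
instance (metrics : List (String × List (String × String))) (metric_name : String) (point_values : List Int) (out : List (String × Int)) : Decidable (Spec_winners metrics metric_name point_values out) := by unfold Spec_winners; infer_instance

-- ===== CLAIM (what is proved, stated in full; the proofs are below) =====
def Claim_equal_winners : Prop := ∀ (metrics : List (String × List (String × String))) (metric_name : String) (point_values : List Int), Dom_winners metrics metric_name point_values → Pre_winners metrics metric_name point_values → Spec_winners metrics metric_name point_values (winners metrics metric_name point_values)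

-- ===== LEMMAS AND PROOFS =====


-- A's first loop splits into three independent component folds
theorem pvFoldA (name : String) (xs : List (String × List (String × String)))
    (a : PySem.Set Int) (b : PySem.Dict Int (List String)) (c : PySem.Dict String Int) :
    xs.foldl
      (fun (st : PySem.Set Int × PySem.Dict Int (List String) × PySem.Dict String Int) p =>
        if 0 < pvMetric p.2 name then
          (PySem.Set.add st.1 (pvMetric p.2 name),
           st.2.1.modify (pvMetric p.2 name) [] (fun us => us ++ [p.1]),
           st.2.2.insert p.1 0)
        else (st.1, st.2.1, st.2.2.insert p.1 0)) (a, b, c)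
    = (xs.foldl (fun a p => if 0 < pvMetric p.2 name then PySem.Set.add a (pvMetric p.2 name) else a) a,
       xs.foldl (fun b p => if 0 < pvMetric p.2 name then b.modify (pvMetric p.2 name) [] (fun us => us ++ [p.1]) else b) b,
       xs.foldl (fun c p => c.insert p.1 0) c) := by
  induction xs generalizing a b c with
  | nil => rfl
  | cons p t ih =>
      simp only [List.foldl_cons]
      by_cases h : 0 < pvMetric p.2 name <;> simp [h, ih]

-- the set of qualifying metric values A accumulates
theorem pvFoldSet (name : String) (xs : List (String × List (String × String))) :
    xs.foldl (fun a p => if 0 < pvMetric p.2 name then PySem.Set.add a (pvMetric p.2 name) else a) PySem.Set.empty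
    = PySem.Set.ofList ((xs.map (fun p => pvMetric p.2 name)).filter (fun v => 0 < v)) := by
  rw [PySem.Set.ofList_eq_foldl, List.foldl_filter, List.foldl_map]
  simp only [decide_eq_true_eq]
  rfl

-- the per-value user groups A accumulates, read through getD
theorem pvFoldGroup (name : String) (xs : List (String × List (String × String)))
    (b : PySem.Dict Int (List String)) (v : Int) :
    (xs.foldl (fun b p => if 0 < pvMetric p.2 name then b.modify (pvMetric p.2 name) [] (fun us => us ++ [p.1]) else b) b).getD v []
    = b.getD v [] ++ (xs.filter (fun p => decide (0 < pvMetric p.2 name) && pvMetric p.2 name == v)).map (fun p => p.1) := by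
  induction xs generalizing b with
  | nil => simp
  | cons p t ih =>
      simp only [List.foldl_cons, List.filter_cons]
      by_cases h : 0 < pvMetric p.2 name
      · by_cases hv : pvMetric p.2 name = v
        · subst hv
          simp [h, ih, PySem.Dict.getD_modify_self]
        · simp [h, hv, ih, PySem.Dict.getD_modify_of_ne _ _ _ (Ne.symm hv)]
      · simp [h, ih]

-- the zero-initialisation fold, read through getD
theorem pvFoldZeroGetD (xs : List (String × List (String × String)))
    (c : PySem.Dict String Int) (u : String) :
    (xs.foldl (fun c p => c.insert p.1 0) c).getD u 0
    = if u ∈ xs.map (fun p => p.1) then 0 else c.getD u 0 := by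
  induction xs generalizing c with
  | nil => simp
  | cons p t ih =>
      simp only [List.foldl_cons, List.map_cons, List.mem_cons]
      by_cases h : u ∈ t.map (fun p => p.1)
      · simp [h, ih]
      · by_cases hu : u = p.1
        · subst hu
          simp [h, ih, PySem.Dict.getD_insert_self]
        · simp [h, hu, ih, PySem.Dict.getD_insert_of_ne _ _ _ hu]


-- inner loop of A's second pass: assign w to every user of a group
theorem pvInnerGetD (us : List String) (w : Int) (d : PySem.Dict String Int) (u : String) :
    (us.foldl (fun d u => d.insert u w) d).getD u 0
    = if u ∈ us then w else d.getD u 0 := by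
  induction us generalizing d with
  | nil => simp
  | cons x t ih =>
      simp only [List.foldl_cons, List.mem_cons]
      by_cases h : u ∈ t
      · simp [h, ih]
      · by_cases hu : u = x
        · subst hu; simp [h, ih, PySem.Dict.getD_insert_self]
        · simp [h, hu, ih, PySem.Dict.getD_insert_of_ne _ _ _ hu]

theorem pvSetUpdateOfSubset (s : PySem.Set String) (xs : List String)
    (h : ∀ x ∈ xs, x ∈ s) : PySem.Set.update s xs = s := by
  induction xs generalizing s with
  | nil => rfl
  | cons x t ih =>
      simp only [PySem.Set.update, List.foldl_cons] at *
      rw [PySem.Set.add_of_mem (h x (by simp))]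
      exact ih s (fun y hy => h y (by simp [hy]))

theorem pvInnerKeys (us : List String) (w : Int) (d : PySem.Dict String Int)
    (h : ∀ u ∈ us, u ∈ d.keys) :
    (us.foldl (fun d u => d.insert u w) d).keys = d.keys := by
  rw [PySem.Dict.keys_foldl_insert us (fun _ _ => w) d]
  exact pvSetUpdateOfSubset _ _ h

-- A's second pass as a whole, with the groups read through g
theorem pvLoop2GetD (g : Int → List String) (zs : List (Int × Int))
    (d : PySem.Dict String Int) (u : String) :
    (zs.foldl (fun d z => (g z.1).foldl (fun d u => d.insert u z.2) d) d).getD u 0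
    = (match zs.reverse.find? (fun z => decide (u ∈ g z.1)) with
       | some z => z.2
       | none => d.getD u 0) := by
  induction zs generalizing d with
  | nil => simp
  | cons z t ih =>
      simp only [List.foldl_cons, List.reverse_cons, List.find?_append]
      rw [ih]
      cases hf : t.reverse.find? (fun z => decide (u ∈ g z.1)) with
      | some z' => simp [Option.or]
      | none =>
          simp only [Option.or]
          by_cases hm : u ∈ g z.1
          · simp [hm, pvInnerGetD]
          · simp [hm, pvInnerGetD]

theorem pvLoop2Keys (g : Int → List String) (zs : List (Int × Int))
    (d : PySem.Dict String Int) (h : ∀ z ∈ zs, ∀ u ∈ g z.1, u ∈ d.keys) :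
    (zs.foldl (fun d z => (g z.1).foldl (fun d u => d.insert u z.2) d) d).keys = d.keys := by
  induction zs generalizing d with
  | nil => rfl
  | cons z t ih =>
      simp only [List.foldl_cons]
      rw [ih, pvInnerKeys _ _ _ (h z (by simp))]
      intro z' hz' u hu
      rw [pvInnerKeys _ _ _ (h z (by simp))]
      exact h z' (by simp [hz']) u hu

-- find? over the reverse of a list with at most one match
theorem pvFindRevOfUnique {α : Type} (p : α → Bool) (zs : List α)
    (h : zs.countP p ≤ 1) : zs.reverse.find? p = zs.find? p := by
  induction zs with
  | nil => rfl
  | cons z t ih =>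
      simp only [List.reverse_cons, List.find?_append, List.find?_cons]
      rw [List.countP_cons] at h
      cases hz : p z with
      | true =>
          have ht : t.countP p = 0 := by simp only [hz, if_true] at h; omega
          have : t.reverse.find? p = none := by
            rw [List.find?_eq_none]
            intro x hx
            have := List.countP_eq_zero.mp ht x (by simpa using hx)
            simpa using this
          simp [this, Option.or]
      | false =>
          rw [ih (by simp only [hz] at h; omega)]
          cases t.find? p <;> simp [Option.or]

theorem pvFindCongr {α : Type} (p q : α → Bool) (l : List α)
    (h : ∀ x ∈ l, p x = q x) : l.find? p = l.find? q := by
  induction l with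
  | nil => rfl
  | cons x t ih =>
      rw [List.find?_cons, List.find?_cons, h x (by simp)]
      cases q x
      · exact ih (fun y hy => h y (by simp [hy]))
      · rfl

theorem pvZipCountZero (t pvt : List Int) (m : Int) (hm : m ∉ t) :
    (t.zip pvt).countP (fun z => z.1 == m) = 0 := by
  rw [List.countP_eq_zero]
  rintro ⟨z1, z2⟩ hz
  have : z1 ∈ t := (List.of_mem_zip hz).1
  simp only [beq_iff_eq]
  rintro rfl
  exact hm this

theorem pvZipCountLe (L pv : List Int) (m : Int) (h : L.Nodup) :
    (L.zip pv).countP (fun z => z.1 == m) ≤ 1 := by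
  induction L generalizing pv with
  | nil => simp
  | cons a t ih =>
      cases pv with
      | nil => simp
      | cons w pvt =>
          rw [List.zip_cons_cons, List.countP_cons]
          rw [List.nodup_cons] at h
          by_cases ha : a = m
          · subst ha
            rw [pvZipCountZero t pvt a h.1]
            simp
          · have := ih pvt h.2
            have hz : ((a, w).1 == m) = false := by simpa using ha
            simp [hz]
            omega

-- find? for the unique key m in zip L pv, when L is strictly decreasing
theorem pvZipFind (L : List Int) (pv : List Int) (hL : L.Pairwise (· > ·)) (m : Int) (hm : m ∈ L) :
    (L.zip pv).find? (fun z => z.1 == m)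
    = if L.countP (fun v => decide (m < v)) < pv.length
      then some (m, pv.getD (L.countP (fun v => decide (m < v))) 0) else none := by
  induction L generalizing pv with
  | nil => simp at hm
  | cons a t ih =>
      rw [List.pairwise_cons] at hL
      cases pv with
      | nil => simp
      | cons w pvt =>
          rw [List.zip_cons_cons, List.find?_cons]
          rcases List.mem_cons.mp hm with hma | hmt
          · subst hma
            have h0 : (m :: t).countP (fun v => decide (m < v)) = 0 := by
              rw [List.countP_eq_zero]
              intro v hv
              rcases List.mem_cons.mp hv with h | h
              · subst h; simp
              · have := hL.1 v h
                simp only [decide_eq_true_eq, not_lt]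
                omega
            rw [h0]
            simp
          · have ham : m < a := hL.1 m hmt
            have hc : (a :: t).countP (fun v => decide (m < v)) = t.countP (fun v => decide (m < v)) + 1 := by
              rw [List.countP_cons]; simp [ham]
            have hne : ((a, w).1 == m) = false := by
              simp only [beq_eq_false_iff_ne, ne_eq]
              intro h; omega
            rw [hne, hc, ih pvt hL.2 hmt]
            simp

-- the heart of the proof: per-user value of A's final dict = B's pvAward
theorem pvMainGetD (name : String) (pv : List Int) (xs : List (String × List (String × String)))
    (hnd : (xs.map (fun p => p.1)).Nodup) (p : String × List (String × String)) (hp : p ∈ xs) :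
    ((((PySem.List.sorted (PySem.Set.ofList ((xs.map (fun p => pvMetric p.2 name)).filter (fun v => 0 < v))) (fun v => v) true).zip pv).foldl
        (fun pts mp => ((xs.foldl (fun b p => if 0 < pvMetric p.2 name then b.modify (pvMetric p.2 name) [] (fun us => us ++ [p.1]) else b) PySem.Dict.empty).getD mp.1 []).foldl
          (fun pts u => pts.insert u mp.2) pts)
        (xs.foldl (fun c p => c.insert p.1 0) PySem.Dict.empty)).getD p.1 0)
    = pvAward (PySem.Set.ofList ((xs.map (fun p => pvMetric p.2 name)).filter (fun v => 0 < v))) pv (pvMetric p.2 name) := by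
  set S : PySem.Set Int := PySem.Set.ofList ((xs.map (fun p => pvMetric p.2 name)).filter (fun v => 0 < v)) with hS
  set L : List Int := PySem.List.sorted S (fun v => v) true with hLdef
  set m : Int := pvMetric p.2 name with hm
  set g : Int → List String := fun v => (xs.foldl (fun b p => if 0 < pvMetric p.2 name then b.modify (pvMetric p.2 name) [] (fun us => us ++ [p.1]) else b) PySem.Dict.empty).getD v [] with hg
  -- the group of a value v
  have hgv : ∀ v, g v = (xs.filter (fun q => decide (0 < pvMetric q.2 name) && pvMetric q.2 name == v)).map (fun q => q.1) := by
    intro v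
    rw [hg]
    beta_reduce
    rw [pvFoldGroup]
    simp [pysem]
  have hzero : (xs.foldl (fun c p => c.insert p.1 (0 : Int)) PySem.Dict.empty).getD p.1 0 = 0 := by
    rw [pvFoldZeroGetD]
    simp only [if_pos (List.mem_map.mpr ⟨p, hp, rfl⟩)]
  have hmem : ∀ v, (p.1 ∈ g v ↔ (0 < m ∧ v = m)) := by
    intro v
    rw [hgv]
    constructor
    · intro h
      obtain ⟨q, hq, hq1⟩ := List.mem_map.mp h
      obtain ⟨hqx, hqc⟩ := List.mem_filter.mp hq
      have hqp : q = p := List.inj_on_of_nodup_map hnd hqx hp hq1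
      subst hqp
      simp only [Bool.and_eq_true, decide_eq_true_eq, beq_iff_eq] at hqc
      exact ⟨hqc.1, hqc.2.symm⟩
    · rintro ⟨h1, rfl⟩
      exact List.mem_map.mpr ⟨p, List.mem_filter.mpr ⟨hp, by rw [← hm]; simp [h1]⟩, rfl⟩
  have hloop := pvLoop2GetD g (L.zip pv) (xs.foldl (fun c p => c.insert p.1 0) PySem.Dict.empty) p.1
  rw [hg] at hloop
  rw [hloop]
  by_cases hm0 : m ≤ 0
  · -- user does not qualify: never assigned, stays 0
    have hnone : ((L.zip pv).reverse.find? (fun z => decide (p.1 ∈ g z.1))) = none := by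
      rw [List.find?_eq_none]
      intro z _
      simp only [decide_eq_true_eq]
      intro hz
      exact absurd ((hmem z.1).mp hz).1 (by omega)
    rw [hg] at hnone
    rw [hnone, hzero]
    rw [pvAward, if_pos hm0]
  · -- qualifying user
    have hmpos : 0 < m := by omega
    have hLperm : L.Perm S := PySem.List.sorted_perm S (fun v => v) true
    have hLnd : L.Nodup := (hLperm.nodup_iff).mpr (PySem.Set.nodup_ofList _)
    have hLpair : L.Pairwise (· > ·) := by
      have h1 := PySem.List.sorted_pairwise_rev S (fun v => v)
      rw [← hLdef] at h1
      have h2 : L.Pairwise (· ≠ ·) := hLnd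
      exact (h1.and h2).imp (fun h => lt_of_le_of_ne h.1 (Ne.symm h.2))
    have hmS : m ∈ S := by
      rw [hS]
      rw [PySem.Set.mem_ofList]
      exact List.mem_filter.mpr ⟨List.mem_map.mpr ⟨p, hp, hm.symm⟩, by simp [hmpos]⟩
    have hmL : m ∈ L := (PySem.List.mem_sorted S (fun v => v) true m).mpr hmS
    have hcong : (L.zip pv).reverse.find? (fun z => decide (p.1 ∈ g z.1))
        = (L.zip pv).reverse.find? (fun z => z.1 == m) := by
      apply pvFindCongr
      intro z _
      simp only [hmem z.1]
      by_cases hz : z.1 = m <;> simp [hz, hmpos]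
    have hrev : (L.zip pv).reverse.find? (fun z => z.1 == m) = (L.zip pv).find? (fun z => z.1 == m) :=
      pvFindRevOfUnique _ _ (pvZipCountLe L pv m hLnd)
    rw [hg] at hcong
    rw [hcong, hrev, pvZipFind L pv hLpair m hmL]
    have hcount : L.countP (fun v => decide (m < v)) = S.countP (fun v => decide (m < v)) :=
      hLperm.countP_eq _
    rw [pvAward, if_neg hm0, hcount]
    by_cases hlt : S.countP (fun v => decide (m < v)) < pv.length
    · simp only [if_pos hlt]
    · simp only [if_neg hlt, hzero]

theorem winners_spec : Claim_equal_winners := by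
  intro metrics name pv _ _
  unfold Spec_winners
  simp only [winners, winners_alt]
  have hnd : ((PySem.Dict.ofList metrics).items.map (fun p => p.1)).Nodup :=
    PySem.Dict.nodup_keys_ofList metrics
  generalize hxs : (PySem.Dict.ofList metrics).items = xs at hnd ⊢
  simp only [pvFoldA, pvFoldSet]
  -- B's vals dict is the list of (user, metric) pairs
  have hvals : (xs.foldl (fun d p => d.insert p.1 (pvMetric p.2 name)) PySem.Dict.empty).items
      = xs.map (fun p => (p.1, pvMetric p.2 name)) := by
    have h := PySem.Dict.items_foldl_insert_fresh xs (fun p => p.1) (fun p => pvMetric p.2 name)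
      PySem.Dict.empty (by intro a _; rfl) hnd
    simpa using h
  -- A's zero-initialised points dict
  have hpts0 : (xs.foldl (fun c p => c.insert p.1 0) PySem.Dict.empty).items
      = xs.map (fun p => (p.1, (0 : Int))) := by
    have h := PySem.Dict.items_foldl_insert_fresh xs (fun p => p.1) (fun _ => (0 : Int))
      PySem.Dict.empty (by intro a _; rfl) hnd
    simpa using h
  have hvalsv : (xs.foldl (fun d p => d.insert p.1 (pvMetric p.2 name)) PySem.Dict.empty).values
      = xs.map (fun p => pvMetric p.2 name) := by
    show (xs.foldl (fun d p => d.insert p.1 (pvMetric p.2 name)) PySem.Dict.empty).items.map (fun q => q.2)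
        = xs.map (fun p => pvMetric p.2 name)
    rw [hvals, List.map_map]
    rfl
  have hkeys0 : (xs.foldl (fun c p => c.insert p.1 (0 : Int)) PySem.Dict.empty).keys
      = xs.map (fun p => p.1) := by
    show (xs.foldl (fun c p => c.insert p.1 (0 : Int)) PySem.Dict.empty).items.map (fun q => q.1)
        = xs.map (fun p => p.1)
    rw [hpts0, List.map_map]
    rfl
  rw [hvals, hvalsv]
  set D2 := List.foldl
      (fun (pts : PySem.Dict String Int) (mp : Int × Int) =>
        List.foldl (fun pts u => pts.insert u mp.2) pts
          ((List.foldl (fun b p => if 0 < pvMetric p.2 name then b.modify (pvMetric p.2 name) [] (fun us => us ++ [p.1]) else b) PySem.Dict.empty xs).getD mp.1 []))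
      (List.foldl (fun (c : PySem.Dict String Int) p => c.insert p.1 (0 : Int)) PySem.Dict.empty xs)
      ((PySem.List.sorted (PySem.Set.ofList ((xs.map (fun p => pvMetric p.2 name)).filter (fun v => 0 < v))) (fun v => v) true).zip pv) with hD2
  have hkeys2 : D2.keys = xs.map (fun p => p.1) := by
    rw [hD2]
    rw [pvLoop2Keys (fun v => (List.foldl (fun b p => if 0 < pvMetric p.2 name then b.modify (pvMetric p.2 name) [] (fun us => us ++ [p.1]) else b) PySem.Dict.empty xs).getD v [])]
    · exact hkeys0
    · intro z _ u hu
      rw [pvFoldGroup] at hu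
      simp only [pysem, List.nil_append] at hu
      rw [hkeys0]
      obtain ⟨q, hq, hq1⟩ := List.mem_map.mp hu
      exact List.mem_map.mpr ⟨q, (List.mem_filter.mp hq).1, hq1⟩
  have hnd2 : D2.keys.Nodup := by rw [hkeys2]; exact hnd
  rw [PySem.Dict.items_eq_map_keys D2 hnd2 (0 : Int), hkeys2, List.map_map, List.map_map]
  apply List.map_congr_left
  intro p hp
  simp only [Function.comp]
  have := pvMainGetD name pv xs hnd p hp
  rw [hD2]
  exact congrArg (Prod.mk p.1) this
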